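-- pv_equiv track=rewrite | github.com/walkenzhong/9417project | preprocess/pre_process_conversation.py | get_daily_data
-- ===== SOURCE A (Python) =====
-- def get_daily_data(time_and_interval):
--     start_year = time_and_interval[0][0]
--     start_mon = time_and_interval[0][1]
--     start_day = time_and_interval[0][2]
--     day_interval_sum = 0
--     daily_data = []
--     for i in range(len(time_and_interval)-1):
--         end_year = time_and_interval[i+1][0]
--         end_mon = time_and_interval[i+1][1]
--         end_day = time_and_interval[i+1][2]
--         if(start_year == end_year and start_mon == end_mon and start_day == end_day):
--             day_interval_sum = day_interval_sum + time_and_interval[i][3]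
--         else:
--             daily_data.append([start_year,start_mon,start_day,day_interval_sum])
--             start_year = end_year
--             start_mon = end_mon
--             start_day = end_day
--             day_interval_sum = 0
--     return daily_data
-- ===== SOURCE B (Python) =====
-- def get_daily_data(time_and_interval):
--     # Group consecutive rows that share the same (year, mon, day).  A finished
--     # group contributes its date plus the sum of its rows' intervals except the
--     # last row's (whose interval crosses the date boundary); the trailing open
--     # group has no closing boundary and is dropped.
--     groups = []
--     cur = []
--     for row in time_and_interval:
--         date = (row[0], row[1], row[2])
--         if cur and (cur[0][0], cur[0][1], cur[0][2]) != date: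
--             groups.append(cur)
--             cur = []
--         cur.append(row)
--     return [[g[0][0], g[0][1], g[0][2], sum(x[3] for x in g[:-1])] for g in groups]
-- ===== Notes on version B (the rewrite author's own statement) =====
-- stated objective: alternative
-- what changed: Replaced A's single-pass state machine (tracked date components, running sum, in-loop flush) by a two-phase decomposition: group consecutive rows by date, then emit for each completed group its date plus the sum of all but its last row's interval.
import Mathlib
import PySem

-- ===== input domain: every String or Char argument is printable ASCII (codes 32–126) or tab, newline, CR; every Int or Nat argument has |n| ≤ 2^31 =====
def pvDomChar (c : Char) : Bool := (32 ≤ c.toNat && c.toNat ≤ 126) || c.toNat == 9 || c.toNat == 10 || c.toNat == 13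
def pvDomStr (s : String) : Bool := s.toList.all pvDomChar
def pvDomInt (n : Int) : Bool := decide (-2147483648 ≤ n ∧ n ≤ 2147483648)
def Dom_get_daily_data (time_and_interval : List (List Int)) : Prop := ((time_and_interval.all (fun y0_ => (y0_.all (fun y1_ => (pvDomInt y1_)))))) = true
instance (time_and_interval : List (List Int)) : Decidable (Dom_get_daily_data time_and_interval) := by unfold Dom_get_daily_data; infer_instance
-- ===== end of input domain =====

-- B replaces A's single-pass state machine by grouping consecutive same-date rows
-- and then aggregating each completed group (objective: alternative decomposition).

-- ===== PORT A =====
def get_daily_data (time_and_interval : List (List Int)) : List (List Int) :=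
  let row0 := PySem.List.pyGetD time_and_interval 0 []
  let start_year := PySem.List.pyGetD row0 0 0
  let start_mon := PySem.List.pyGetD row0 1 0
  let start_day := PySem.List.pyGetD row0 2 0
  let st := (PySem.List.pyRange 0 ((time_and_interval.length : Int) - 1) 1).foldl
    (fun (st : Int × Int × Int × Int × List (List Int)) i =>
      let nxt := PySem.List.pyGetD time_and_interval (i + 1) []
      let end_year := PySem.List.pyGetD nxt 0 0
      let end_mon := PySem.List.pyGetD nxt 1 0
      let end_day := PySem.List.pyGetD nxt 2 0
      if st.1 = end_year ∧ st.2.1 = end_mon ∧ st.2.2.1 = end_day then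
        (st.1, st.2.1, st.2.2.1,
         st.2.2.2.1 + PySem.List.pyGetD (PySem.List.pyGetD time_and_interval i []) 3 0,
         st.2.2.2.2)
      else
        (end_year, end_mon, end_day, 0,
         st.2.2.2.2 ++ [[st.1, st.2.1, st.2.2.1, st.2.2.2.1]]))
    (start_year, start_mon, start_day, 0, ([] : List (List Int)))
  st.2.2.2.2

-- ===== PORT B =====
def get_daily_data_alt (time_and_interval : List (List Int)) : List (List Int) :=
  (time_and_interval.foldl
    (fun (st : List (List (List Int)) × List (List Int)) row =>
      let date := (PySem.List.pyGetD row 0 0, PySem.List.pyGetD row 1 0, PySem.List.pyGetD row 2 0)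
      if st.2 ≠ [] ∧
          (PySem.List.pyGetD (st.2.headD []) 0 0, PySem.List.pyGetD (st.2.headD []) 1 0,
           PySem.List.pyGetD (st.2.headD []) 2 0) ≠ date then
        (st.1 ++ [st.2], [row])
      else
        (st.1, st.2 ++ [row]))
    (([] : List (List (List Int))), ([] : List (List Int)))).1.map (fun g =>
    [PySem.List.pyGetD (g.headD []) 0 0, PySem.List.pyGetD (g.headD []) 1 0,
     PySem.List.pyGetD (g.headD []) 2 0,
     g.dropLast.foldl (fun a x => a + PySem.List.pyGetD x 3 0) 0])

-- ===== PRECONDITION & SPEC =====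
-- Pre_ excludes exactly the inputs on which Python A raises IndexError: the empty
-- list (time_and_interval[0]), a row shorter than 3 fields (the date reads), and a
-- row shorter than 4 fields whose date equals the next row's date (the [3] read).
def Pre_get_daily_data (time_and_interval : List (List Int)) : Prop :=
  time_and_interval ≠ [] ∧
  (∀ r ∈ time_and_interval, 3 ≤ r.length) ∧
  (∀ p ∈ time_and_interval.zip time_and_interval.tail,
      p.1.take 3 = p.2.take 3 → 4 ≤ p.1.length)
instance (time_and_interval : List (List Int)) : Decidable (Pre_get_daily_data time_and_interval) := by
  unfold Pre_get_daily_data; infer_instance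

def pvWitness_get_daily_data : List (List Int) :=
  [[2020, 1, 1, 5], [2020, 1, 1], [2020, 1, 2, 7]]

def Spec_get_daily_data (time_and_interval : List (List Int)) (out : List (List Int)) : Prop := out = get_daily_data_alt time_and_interval
instance (time_and_interval : List (List Int)) (out : List (List Int)) : Decidable (Spec_get_daily_data time_and_interval out) := by unfold Spec_get_daily_data; infer_instance

-- ===== CLAIM (what is proved, stated in full; the proofs are below) =====
def Claim_equal_get_daily_data : Prop := ∀ (time_and_interval : List (List Int)), Dom_get_daily_data time_and_interval → Pre_get_daily_data time_and_interval → Spec_get_daily_data time_and_interval (get_daily_data time_and_interval)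

-- ===== LEMMAS AND PROOFS =====

-- sum of row[3] over a list of rows
def pvSum3 (xs : List (List Int)) : Int :=
  xs.foldl (fun a x => a + PySem.List.pyGetD x 3 0) 0

-- the per-group output of B
def pvF (g : List (List Int)) : List Int :=
  [PySem.List.pyGetD (g.headD []) 0 0, PySem.List.pyGetD (g.headD []) 1 0,
   PySem.List.pyGetD (g.headD []) 2 0, pvSum3 g.dropLast]

-- A's loop, as structural recursion over the list of adjacent pairs
def pvGoA (sy sm sd acc : Int) : List (List Int × List Int) → List (List Int)
  | [] => []
  | (a, b) :: ps =>
    if sy = PySem.List.pyGetD b 0 0 ∧ sm = PySem.List.pyGetD b 1 0 ∧ sd = PySem.List.pyGetD b 2 0 then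
      pvGoA sy sm sd (acc + PySem.List.pyGetD a 3 0) ps
    else
      [sy, sm, sd, acc] ::
        pvGoA (PySem.List.pyGetD b 0 0) (PySem.List.pyGetD b 1 0) (PySem.List.pyGetD b 2 0) 0 ps

-- B's grouping loop, as structural recursion (completed groups only)
def pvRunsB (cur : List (List Int)) : List (List Int) → List (List (List Int))
  | [] => []
  | row :: rest =>
    if cur ≠ [] ∧
        (PySem.List.pyGetD (cur.headD []) 0 0, PySem.List.pyGetD (cur.headD []) 1 0,
         PySem.List.pyGetD (cur.headD []) 2 0)
          ≠ (PySem.List.pyGetD row 0 0, PySem.List.pyGetD row 1 0, PySem.List.pyGetD row 2 0) then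
      cur :: pvRunsB [row] rest
    else
      pvRunsB (cur ++ [row]) rest

-- indexed loop over range(len-1) reading xs[i] and xs[i+1]  =  fold over zip xs xs.tail
lemma pv_fold_pairs {σ : Type} (xs : List (List Int)) (F : σ → List Int → List Int → σ) (init : σ) :
    (List.range (xs.length - 1)).foldl
        (fun st k => F st (xs.getD k []) (xs.getD (k + 1) [])) init
      = (xs.zip xs.tail).foldl (fun st p => F st p.1 p.2) init := by
  induction xs generalizing init with
  | nil => simp
  | cons a rest ih =>
    match rest with
    | [] => simp
    | b :: r =>
      have hr : (a :: b :: r).length - 1 = (b :: r).length - 1 + 1 := by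
        simp
      rw [hr, List.range_succ_eq_map]
      simp only [List.foldl_cons, List.foldl_map]
      have hfun : (fun (st : σ) (k : Nat) =>
            F st ((a :: b :: r).getD (k + 1) []) ((a :: b :: r).getD (k + 1 + 1) []))
          = fun st k => F st ((b :: r).getD k []) ((b :: r).getD (k + 1) []) := by
        funext st k; simp
      rw [hfun]
      simpa using ih (F init ((a :: b :: r).getD 0 []) ((a :: b :: r).getD 1 []))

-- A's accumulator fold equals out ++ pvGoA
lemma pv_foldA (ps : List (List Int × List Int)) (sy sm sd acc : Int) (out : List (List Int)) :
    (ps.foldl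
        (fun (st : Int × Int × Int × Int × List (List Int)) (p : List Int × List Int) =>
          if st.1 = PySem.List.pyGetD p.2 0 0 ∧ st.2.1 = PySem.List.pyGetD p.2 1 0 ∧
              st.2.2.1 = PySem.List.pyGetD p.2 2 0 then
            (st.1, st.2.1, st.2.2.1, st.2.2.2.1 + PySem.List.pyGetD p.1 3 0, st.2.2.2.2)
          else
            (PySem.List.pyGetD p.2 0 0, PySem.List.pyGetD p.2 1 0, PySem.List.pyGetD p.2 2 0, 0,
             st.2.2.2.2 ++ [[st.1, st.2.1, st.2.2.1, st.2.2.2.1]]))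
        (sy, sm, sd, acc, out)).2.2.2.2
      = out ++ pvGoA sy sm sd acc ps := by
  induction ps generalizing sy sm sd acc out with
  | nil => simp [pvGoA]
  | cons p ps ih =>
    obtain ⟨a, b⟩ := p
    by_cases h : sy = PySem.List.pyGetD b 0 0 ∧ sm = PySem.List.pyGetD b 1 0 ∧
        sd = PySem.List.pyGetD b 2 0
    · simp only [List.foldl_cons, pvGoA, if_pos h]
      exact ih sy sm sd (acc + PySem.List.pyGetD a 3 0) out
    · simp only [List.foldl_cons, pvGoA, if_neg h]
      rw [ih]
      simp

-- B's grouping fold equals groups ++ pvRunsB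
lemma pv_foldB (rows : List (List Int)) (groups : List (List (List Int))) (cur : List (List Int)) :
    (rows.foldl
        (fun (st : List (List (List Int)) × List (List Int)) row =>
          if st.2 ≠ [] ∧
              (PySem.List.pyGetD (st.2.headD []) 0 0, PySem.List.pyGetD (st.2.headD []) 1 0,
               PySem.List.pyGetD (st.2.headD []) 2 0)
                ≠ (PySem.List.pyGetD row 0 0, PySem.List.pyGetD row 1 0,
                   PySem.List.pyGetD row 2 0) then
            (st.1 ++ [st.2], [row])
          else
            (st.1, st.2 ++ [row]))
        (groups, cur)).1
      = groups ++ pvRunsB cur rows := by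
  induction rows generalizing groups cur with
  | nil => simp [pvRunsB]
  | cons row rest ih =>
    by_cases h : cur ≠ [] ∧
        (PySem.List.pyGetD (cur.headD []) 0 0, PySem.List.pyGetD (cur.headD []) 1 0,
         PySem.List.pyGetD (cur.headD []) 2 0)
          ≠ (PySem.List.pyGetD row 0 0, PySem.List.pyGetD row 1 0, PySem.List.pyGetD row 2 0)
    · simp only [List.foldl_cons, pvRunsB, if_pos h]
      rw [ih]; simp
    · simp only [List.foldl_cons, pvRunsB, if_neg h]
      exact ih groups (cur ++ [row])

-- MAIN: A's pair recursion, started with the state that the current (nonempty)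
-- group `cur` induces, computes exactly B's per-group outputs.
lemma pv_main (rest cur : List (List Int)) (hc : cur ≠ []) :
    pvGoA (PySem.List.pyGetD (cur.headD []) 0 0) (PySem.List.pyGetD (cur.headD []) 1 0)
        (PySem.List.pyGetD (cur.headD []) 2 0) (pvSum3 cur.dropLast)
        ((cur.getLastD [] :: rest).zip rest)
      = (pvRunsB cur rest).map pvF := by
  induction rest generalizing cur with
  | nil => simp [pvGoA, pvRunsB]
  | cons row rs ih =>
    have hzip : (cur.getLastD [] :: row :: rs).zip (row :: rs)
        = (cur.getLastD [], row) :: (row :: rs).zip rs := by simp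
    by_cases h : PySem.List.pyGetD (cur.headD []) 0 0 = PySem.List.pyGetD row 0 0 ∧
        PySem.List.pyGetD (cur.headD []) 1 0 = PySem.List.pyGetD row 1 0 ∧
        PySem.List.pyGetD (cur.headD []) 2 0 = PySem.List.pyGetD row 2 0
    · -- row continues the group
      have hlast : cur.dropLast ++ [cur.getLastD []] = cur := by
        have h1 : cur.getLastD [] = cur.getLast hc := by
          simp [List.getLastD_eq_getLast?, List.getLast?_eq_some_getLast hc]
        rw [h1]; exact List.dropLast_append_getLast hc
      have hsum : pvSum3 cur.dropLast + PySem.List.pyGetD (cur.getLastD []) 3 0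
          = pvSum3 (cur ++ [row]).dropLast := by
        rw [List.dropLast_concat]
        conv_rhs => rw [← hlast]
        simp [pvSum3, List.foldl_append]
      have hhead' : (cur ++ [row]).headD [] = cur.headD [] := by
        cases cur with
        | nil => exact absurd rfl hc
        | cons x xs => simp
      have hgl' : (cur ++ [row]).getLastD [] = row := by
        simp [List.getLastD_eq_getLast?]
      have step := ih (cur ++ [row]) (by simp)
      rw [hzip]
      simp only [pvGoA, if_pos h]
      rw [hsum]
      rw [pvRunsB, if_neg (fun hcontra => hcontra.2 (by
        rw [Prod.mk.injEq, Prod.mk.injEq]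
        exact ⟨h.1, h.2.1, h.2.2⟩))]
      rw [← step, hhead', hgl']
    · -- row starts a new group; the current group is flushed
      have hne : (PySem.List.pyGetD (cur.headD []) 0 0, PySem.List.pyGetD (cur.headD []) 1 0,
          PySem.List.pyGetD (cur.headD []) 2 0)
            ≠ (PySem.List.pyGetD row 0 0, PySem.List.pyGetD row 1 0,
               PySem.List.pyGetD row 2 0) := by
        intro hcontra
        rw [Prod.mk.injEq, Prod.mk.injEq] at hcontra
        exact h ⟨hcontra.1, hcontra.2.1, hcontra.2.2⟩
      have step := ih [row] (by simp)
      rw [hzip]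
      simp only [pvGoA, if_neg h]
      rw [pvRunsB, if_pos ⟨hc, hne⟩]
      simp only [List.map_cons]
      refine List.cons_eq_cons.mpr ⟨?_, ?_⟩
      · rw [pvF]
      · simpa [pvSum3] using step

-- ===== VERDICT (by name: the statement is the Claim_ definition above) =====
theorem get_daily_data_spec : Claim_equal_get_daily_data := by
  intro t _hDom hPre
  obtain ⟨hne, hlen, _hpair⟩ := hPre
  show get_daily_data t = get_daily_data_alt t
  cases t with
  | nil => exact absurd rfl hne
  | cons r rest =>
    -- B side
    have hB : get_daily_data_alt (r :: rest) = (pvRunsB [] (r :: rest)).map pvF := by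
      unfold get_daily_data_alt
      rw [pv_foldB (r :: rest) [] []]
      simp [pvF, pvSum3]
    -- A side: range fold → pair fold → pvGoA
    have hA : get_daily_data (r :: rest)
        = pvGoA (PySem.List.pyGetD r 0 0) (PySem.List.pyGetD r 1 0) (PySem.List.pyGetD r 2 0) 0
            ((r :: rest).zip rest) := by
      unfold get_daily_data
      have h1 : PySem.List.pyRange 0 (((r :: rest).length : Int) - 1) 1
          = (List.range ((r :: rest).length - 1)).map (fun k : Nat => (k : Int)) := by
        rw [PySem.List.pyRange_one]
        rw [show ((((r :: rest).length : Int) - 1) - 0).toNat = (r :: rest).length - 1 from by omega]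
        exact List.map_congr_left (fun k _ => by simp)
      have h2 : ∀ (k : Nat),
          PySem.List.pyGetD (r :: rest) ((k : Int) + 1) [] = (r :: rest).getD (k + 1) [] ∧
          PySem.List.pyGetD (r :: rest) (k : Int) [] = (r :: rest).getD k [] := by
        intro k
        constructor
        · have hcast : ((k : Int) + 1) = ((k + 1 : Nat) : Int) := by push_cast; ring
          rw [hcast, PySem.List.pyGetD_natCast]
        · rw [PySem.List.pyGetD_natCast]
      rw [h1]
      simp only [List.foldl_map, PySem.List.pyGetD_zero_cons]
      have hfun : (fun (st : Int × Int × Int × Int × List (List Int)) (k : Nat) =>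
            if st.1 = PySem.List.pyGetD (PySem.List.pyGetD (r :: rest) ((k : Int) + 1) []) 0 0 ∧
                st.2.1 = PySem.List.pyGetD (PySem.List.pyGetD (r :: rest) ((k : Int) + 1) []) 1 0 ∧
                st.2.2.1 = PySem.List.pyGetD (PySem.List.pyGetD (r :: rest) ((k : Int) + 1) []) 2 0 then
              (st.1, st.2.1, st.2.2.1,
               st.2.2.2.1 + PySem.List.pyGetD (PySem.List.pyGetD (r :: rest) (k : Int) []) 3 0,
               st.2.2.2.2)
            else
              (PySem.List.pyGetD (PySem.List.pyGetD (r :: rest) ((k : Int) + 1) []) 0 0,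
               PySem.List.pyGetD (PySem.List.pyGetD (r :: rest) ((k : Int) + 1) []) 1 0,
               PySem.List.pyGetD (PySem.List.pyGetD (r :: rest) ((k : Int) + 1) []) 2 0, 0,
               st.2.2.2.2 ++ [[st.1, st.2.1, st.2.2.1, st.2.2.2.1]]))
          = fun (st : Int × Int × Int × Int × List (List Int)) (k : Nat) =>
              (fun st (a b : List Int) =>
                if st.1 = PySem.List.pyGetD b 0 0 ∧ st.2.1 = PySem.List.pyGetD b 1 0 ∧
                    st.2.2.1 = PySem.List.pyGetD b 2 0 then
                  (st.1, st.2.1, st.2.2.1, st.2.2.2.1 + PySem.List.pyGetD a 3 0, st.2.2.2.2)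
                else
                  (PySem.List.pyGetD b 0 0, PySem.List.pyGetD b 1 0, PySem.List.pyGetD b 2 0, 0,
                   st.2.2.2.2 ++ [[st.1, st.2.1, st.2.2.1, st.2.2.2.1]]))
                st ((r :: rest).getD k []) ((r :: rest).getD (k + 1) []) := by
        funext st k
        rw [(h2 k).1, (h2 k).2]
      rw [hfun]
      rw [pv_fold_pairs (r :: rest)
        (fun (st : Int × Int × Int × Int × List (List Int)) (a b : List Int) =>
          if st.1 = PySem.List.pyGetD b 0 0 ∧ st.2.1 = PySem.List.pyGetD b 1 0 ∧
              st.2.2.1 = PySem.List.pyGetD b 2 0 then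
            (st.1, st.2.1, st.2.2.1, st.2.2.2.1 + PySem.List.pyGetD a 3 0, st.2.2.2.2)
          else
            (PySem.List.pyGetD b 0 0, PySem.List.pyGetD b 1 0, PySem.List.pyGetD b 2 0, 0,
             st.2.2.2.2 ++ [[st.1, st.2.1, st.2.2.1, st.2.2.2.1]]))
        (PySem.List.pyGetD r 0 0, PySem.List.pyGetD r 1 0, PySem.List.pyGetD r 2 0, 0, [])]
      rw [pv_foldA]
      simp
    rw [hA, hB]
    have hmain := pv_main rest [r] (by simp)
    simp only [List.headD_cons] at hmain
    rw [show ([r] : List (List Int)).getLastD [] = r from by simp [List.getLastD],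
        show ([r] : List (List Int)).dropLast = [] from by simp,
        show pvSum3 [] = 0 from rfl] at hmain
    rw [pvRunsB, if_neg (by simp)]
    exact hmain
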